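-- pv_equiv track=rewrite | github.com/jinaur/python | nypc/2022_정수놀이.py | solve
-- ===== SOURCE A (Python) =====
-- def isqrt(v):
--     s = 1
--     e = 10**9
--     t = 0
--     while s <= e:
--         m = (s + e) // 2
--         if m * m <= v:
--             s = m + 1
--             t = m
--         else:
--             e = m - 1
--     return t
--
-- def solve(a, b):
--     if a < b:
--         return solve(b, a)
--     if a == b:
--         return 0
--     ret = a - b
--     k = isqrt(a)
--     if a <= k * (k + 1):
--         ret = min(ret, solve(k, b) + a - k * k + 1)
--     else:
--         ret = min(ret, solve(k + 1, b) + (k + 1) * (k + 1) - a + 1)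
--     return ret
-- ===== SOURCE B (Python) =====
-- def isqrt(v):
--     s = 1
--     e = 10**9
--     t = 0
--     while s <= e:
--         m = (s + e) // 2
--         if m * m <= v:
--             s = m + 1
--             t = m
--         else:
--             e = m - 1
--     return t
--
-- def solve(a, b):
--     if a < b:
--         a, b = b, a
--     best = a - b
--     acc = 0
--     while a != b:
--         k = isqrt(a)
--         if a <= k * (k + 1):
--             acc += a - k * k + 1
--             a = k
--         else:
--             acc += (k + 1) * (k + 1) - a + 1
--             a = k + 1
--         if a < b:
--             a, b = b, a
--         best = min(best, acc + (a - b))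
--     return best
-- ===== Notes on version B (the rewrite author's own statement) =====
-- stated objective: alternative
-- what changed: solve is rewritten as a single iterative loop that threads an accumulated step cost and a running minimum instead of the tail-plus-min recursion of A; the isqrt helper is kept as-is.
import Mathlib
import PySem

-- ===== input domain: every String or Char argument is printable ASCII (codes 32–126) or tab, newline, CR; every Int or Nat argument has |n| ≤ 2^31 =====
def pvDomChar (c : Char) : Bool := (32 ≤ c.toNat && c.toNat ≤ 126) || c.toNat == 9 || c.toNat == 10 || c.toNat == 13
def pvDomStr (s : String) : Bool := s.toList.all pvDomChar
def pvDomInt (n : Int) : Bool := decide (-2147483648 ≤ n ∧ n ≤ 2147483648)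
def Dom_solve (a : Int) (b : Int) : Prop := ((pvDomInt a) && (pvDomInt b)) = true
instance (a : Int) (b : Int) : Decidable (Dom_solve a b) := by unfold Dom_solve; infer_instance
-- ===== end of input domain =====

-- B rewrites A's tail-plus-min recursion as one iterative loop threading an accumulated step cost
-- and a running minimum; the isqrt helper is identical in both Pythons and shared here.

-- ===== PORT A =====
-- the binary-search isqrt helper (identical in Source A and Source B)
def isqrtGo (v s e t : Int) : Int :=
  if _h : s ≤ e then
    let m := PySem.Int.floordiv (s + e) 2
    if m * m ≤ v then isqrtGo v (m + 1) e m
    else isqrtGo v s (m - 1) t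
  else t
termination_by (e + 1 - s).toNat
decreasing_by
  · have := PySem.Int.floordiv_two_mid_bounds (lo := s) (hi := e) _h
    omega
  · have := PySem.Int.floordiv_two_mid_bounds (lo := s) (hi := e) _h
    omega

def isqrt (v : Int) : Int := isqrtGo v 1 1000000000 0

-- A's recursion, fuel-guarded only to make it total in Lean (the fuel is ample on every input Pre_ admits)
def solveFuel : Nat → Int → Int → Int
  | 0, _, _ => 0
  | Nat.succ f, a, b =>
    if a < b then solveFuel f b a
    else if a = b then 0
    else
      let ret := a - b
      let k := isqrt a
      if a ≤ k * (k + 1) then min ret (solveFuel f k b + a - k * k + 1)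
      else min ret (solveFuel f (k + 1) b + (k + 1) * (k + 1) - a + 1)

def solve (a : Int) (b : Int) : Int := solveFuel (2 * a.toNat + 2 * b.toNat + 4) a b

-- ===== PORT B =====
-- the while-loop of Source B; the same ample fuel as the totality guard
def loopB : Nat → Int → Int → Int → Int → Int
  | 0, _, _, _, best => best
  | Nat.succ f, a, b, acc, best =>
    if a ≠ b then
      let k := isqrt a
      let p := if a ≤ k * (k + 1) then (k, acc + (a - k * k + 1))
               else (k + 1, acc + ((k + 1) * (k + 1) - a + 1))
      let q := if p.1 < b then (b, p.1) else (p.1, b)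
      loopB f q.1 q.2 p.2 (min best (p.2 + (q.1 - q.2)))
    else best

def solve_alt (a : Int) (b : Int) : Int :=
  let p := if a < b then (b, a) else (a, b)
  loopB (2 * a.toNat + 2 * b.toNat + 4) p.1 p.2 0 (p.1 - p.2)

-- ===== PRECONDITION & SPEC =====
-- Pre_ excludes exactly the inputs where Python A never returns: for a ≠ b with min(a, b) < 1 the
-- recursion reaches a state solve(x, b) with x ≤ 1 > b and recurses forever (RecursionError).
def Pre_solve (a : Int) (b : Int) : Prop := a = b ∨ (1 ≤ a ∧ 1 ≤ b)
instance (a : Int) (b : Int) : Decidable (Pre_solve a b) := by unfold Pre_solve; infer_instance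
def pvWitness_solve : Int × Int := (10, 3)

def Spec_solve (a : Int) (b : Int) (out : Int) : Prop := out = solve_alt a b
instance (a : Int) (b : Int) (out : Int) : Decidable (Spec_solve a b out) := by unfold Spec_solve; infer_instance

-- ===== CLAIM (what is proved, stated in full; the proofs are below) =====
def Claim_equal_solve : Prop := ∀ (a : Int) (b : Int), Dom_solve a b → Pre_solve a b → Spec_solve a b (solve a b)

-- ===== LEMMAS AND PROOFS =====

-- binary-search invariant: s = t + 1, t² ≤ v < (e+1)²
theorem isqrtGo_spec (v s e t : Int) (hs : s = t + 1) (ht : t * t ≤ v)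
    (he : v < (e + 1) * (e + 1)) (ht0 : 0 ≤ t) (he0 : -1 ≤ e) :
    0 ≤ isqrtGo v s e t ∧ isqrtGo v s e t * isqrtGo v s e t ≤ v ∧
      v < (isqrtGo v s e t + 1) * (isqrtGo v s e t + 1) := by
  fun_induction isqrtGo v s e t with
  | case1 s e t h m hm ih =>
    have hb := PySem.Int.floordiv_two_mid_bounds (lo := s) (hi := e) h
    exact ih rfl hm he (by omega) (by omega)
  | case2 s e t h m hm ih =>
    have hb := PySem.Int.floordiv_two_mid_bounds (lo := s) (hi := e) h
    have hx : v < (m - 1 + 1) * (m - 1 + 1) := by simpa using (lt_of_not_ge hm)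
    exact ih hs ht hx ht0 (by omega)
  | case3 s e t h =>
    refine ⟨ht0, ht, ?_⟩
    have h1 : e + 1 ≤ t + 1 := by omega
    have h2 : (0:Int) ≤ e + 1 := by omega
    nlinarith

theorem isqrt_spec (v : Int) (hv : 1 ≤ v) (hub : v ≤ 2 ^ 31) :
    1 ≤ isqrt v ∧ isqrt v * isqrt v ≤ v ∧ v < (isqrt v + 1) * (isqrt v + 1) := by
  have h := isqrtGo_spec v 1 1000000000 0 rfl (by omega) (by nlinarith) le_rfl (by omega)
  unfold isqrt
  refine ⟨?_, h.2.1, h.2.2⟩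
  rcases h with ⟨h0, h1, h2⟩
  by_contra hk
  have : isqrtGo v 1 1000000000 0 = 0 := by omega
  rw [this] at h2; omega

-- the next value of a in either branch is ≥ 1 and strictly smaller than a
theorem step_facts (a : Int) (h2 : 2 ≤ a) (hub : a ≤ 2 ^ 31) :
    1 ≤ isqrt a ∧ isqrt a < a ∧ (¬ a ≤ isqrt a * (isqrt a + 1) → isqrt a + 1 < a) := by
  obtain ⟨h1, hle, hlt⟩ := isqrt_spec a (by omega) hub
  refine ⟨h1, ?_, ?_⟩
  · nlinarith
  · intro h; nlinarith

theorem solveFuel_succ (f : Nat) (a b : Int) :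
    solveFuel (f + 1) a b =
      if a < b then solveFuel f b a
      else if a = b then 0
      else if a ≤ isqrt a * (isqrt a + 1) then
        min (a - b) (solveFuel f (isqrt a) b + a - isqrt a * isqrt a + 1)
      else
        min (a - b) (solveFuel f (isqrt a + 1) b + (isqrt a + 1) * (isqrt a + 1) - a + 1) := rfl

theorem loopB_succ (f : Nat) (a b acc best : Int) :
    loopB (f + 1) a b acc best =
      if a ≠ b then
        let p := if a ≤ isqrt a * (isqrt a + 1) then (isqrt a, acc + (a - isqrt a * isqrt a + 1))
                 else (isqrt a + 1, acc + ((isqrt a + 1) * (isqrt a + 1) - a + 1))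
        let q := if p.1 < b then (b, p.1) else (p.1, b)
        loopB f q.1 q.2 p.2 (min best (p.2 + (q.1 - q.2)))
      else best := rfl

-- the first candidate of A's recursion bounds its result
theorem solveFuel_le (f : Nat) (a b : Int) (hf : 1 ≤ f) (hba : b ≤ a) :
    solveFuel f a b ≤ a - b := by
  obtain ⟨f', rfl⟩ : ∃ f', f = f' + 1 := ⟨f - 1, by omega⟩
  rw [solveFuel_succ, if_neg (by omega)]
  by_cases hab : a = b
  · rw [if_pos hab]; omega
  · rw [if_neg hab]; split <;> omega

-- with ample fuel the result of A's recursion does not depend on the fuel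
theorem solveFuel_stab : ∀ (n : Nat) (a b : Int) (f g : Nat), 1 ≤ b → b ≤ a → a ≤ 2 ^ 31 →
    a.toNat ≤ n → 2 * n + 1 ≤ f → 2 * n + 1 ≤ g → solveFuel f a b = solveFuel g a b := by
  intro n
  induction n with
  | zero => intro a b f g hb hba _ hn _ _; omega
  | succ n ih =>
    have aux : ∀ (x y : Int) (f g : Nat), 1 ≤ x → 1 ≤ y → x ≤ 2 ^ 31 → y ≤ 2 ^ 31 →
        x.toNat ≤ n → y.toNat ≤ n → 2 * n + 2 ≤ f → 2 * n + 2 ≤ g →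
        solveFuel f x y = solveFuel g x y := by
      intro x y f g hx hy hxu hyu hxn hyn hf hg
      by_cases hxy : x < y
      · obtain ⟨f', rfl⟩ : ∃ f', f = f' + 1 := ⟨f - 1, by omega⟩
        obtain ⟨g', rfl⟩ : ∃ g', g = g' + 1 := ⟨g - 1, by omega⟩
        simp only [solveFuel_succ, if_pos hxy]
        exact ih y x f' g' hx (le_of_lt hxy) hyu hyn (by omega) (by omega)
      · exact ih x y f g hy (by omega) hxu hxn (by omega) (by omega)
    intro a b f g hb hba hub hn hf hg
    obtain ⟨f', rfl⟩ : ∃ f', f = f' + 1 := ⟨f - 1, by omega⟩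
    obtain ⟨g', rfl⟩ : ∃ g', g = g' + 1 := ⟨g - 1, by omega⟩
    by_cases hab : a = b
    · subst hab
      simp [solveFuel_succ]
    · have hnlt : ¬ a < b := by omega
      simp only [solveFuel_succ, if_neg hnlt, if_neg hab]
      have ha2 : 2 ≤ a := by omega
      obtain ⟨hk1, hklt, hk2⟩ := step_facts a ha2 hub
      by_cases hbr : a ≤ isqrt a * (isqrt a + 1)
      · simp only [if_pos hbr]
        rw [aux (isqrt a) b f' g' hk1 hb (by omega) (by omega) (by omega) (by omega) (by omega)
          (by omega)]
      · have hk2' := hk2 hbr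
        simp only [if_neg hbr]
        rw [aux (isqrt a + 1) b f' g' (by omega) hb (by omega) (by omega) (by omega) (by omega)
            (by omega) (by omega)]

-- loop invariant of B: the loop computes min best (acc + A's answer for the current state)
theorem loopB_main : ∀ (n : Nat) (a b acc best : Int) (f : Nat), 1 ≤ b → b ≤ a → a ≤ 2 ^ 31 →
    a.toNat ≤ n → 2 * n + 2 ≤ f → best ≤ acc + (a - b) →
    loopB f a b acc best = min best (acc + solveFuel f a b) := by
  intro n
  induction n with
  | zero => intro a b acc best f hb hba _ hn _ _; omega
  | succ n ih =>
    intro a b acc best f hb hba hub hn hf hbest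
    obtain ⟨f', rfl⟩ : ∃ f', f = f' + 1 := ⟨f - 1, by omega⟩
    by_cases hab : a = b
    · subst hab
      rw [loopB_succ, if_neg (by simp), solveFuel_succ, if_neg (lt_irrefl a), if_pos rfl]
      omega
    · have hnlt : ¬ a < b := by omega
      have ha2 : 2 ≤ a := by omega
      obtain ⟨hk1, hklt, hk2⟩ := step_facts a ha2 hub
      simp only [loopB_succ, if_pos hab, solveFuel_succ, if_neg hnlt, if_neg hab, ne_eq,
        not_false_eq_true, if_true]
      by_cases hbr : a ≤ isqrt a * (isqrt a + 1)
      · simp only [if_pos hbr]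
        by_cases hsw : isqrt a < b
        · simp only [if_pos hsw]
          rw [ih b (isqrt a) _ _ f' hk1 (by omega) (by omega) (by omega) (by omega)
            (min_le_right _ _)]
          obtain ⟨f'', hf''⟩ : ∃ f'', f' = f'' + 1 := ⟨f' - 1, by omega⟩
          have hun : solveFuel f' (isqrt a) b = solveFuel f'' b (isqrt a) := by
            rw [hf'', solveFuel_succ, if_pos hsw]
          rw [hun, solveFuel_stab n b (isqrt a) f'' f' hk1 (by omega) (by omega) (by omega)
            (by omega) (by omega)]
          have hS := solveFuel_le f' b (isqrt a) (by omega) (by omega)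
          generalize solveFuel f' b (isqrt a) = S at hS ⊢
          generalize isqrt a * isqrt a = K
          omega
        · simp only [if_neg hsw]
          rw [ih (isqrt a) b _ _ f' hb (by omega) (by omega) (by omega) (by omega)
            (min_le_right _ _)]
          have hS := solveFuel_le f' (isqrt a) b (by omega) (by omega)
          generalize solveFuel f' (isqrt a) b = S at hS ⊢
          generalize isqrt a * isqrt a = K
          omega
      · have hk2' := hk2 hbr
        simp only [if_neg hbr]
        by_cases hsw : isqrt a + 1 < b
        · simp only [if_pos hsw]
          rw [ih b (isqrt a + 1) _ _ f' (by omega) (by omega) (by omega) (by omega) (by omega)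
            (min_le_right _ _)]
          obtain ⟨f'', hf''⟩ : ∃ f'', f' = f'' + 1 := ⟨f' - 1, by omega⟩
          have hun : solveFuel f' (isqrt a + 1) b = solveFuel f'' b (isqrt a + 1) := by
            rw [hf'', solveFuel_succ, if_pos hsw]
          rw [hun, solveFuel_stab n b (isqrt a + 1) f'' f' (by omega) (by omega) (by omega)
            (by omega) (by omega) (by omega)]
          have hS := solveFuel_le f' b (isqrt a + 1) (by omega) (by omega)
          generalize solveFuel f' b (isqrt a + 1) = S at hS ⊢
          generalize (isqrt a + 1) * (isqrt a + 1) = K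
          omega
        · simp only [if_neg hsw]
          rw [ih (isqrt a + 1) b _ _ f' hb (by omega) (by omega) (by omega) (by omega)
            (min_le_right _ _)]
          have hS := solveFuel_le f' (isqrt a + 1) b (by omega) (by omega)
          generalize solveFuel f' (isqrt a + 1) b = S at hS ⊢
          generalize (isqrt a + 1) * (isqrt a + 1) = K
          omega

theorem solve_eq_sorted (a b : Int) (hb : 1 ≤ b) (hba : b < a) (hub : a ≤ 2 ^ 31)
    (f : Nat) (hf : 2 * a.toNat + 2 ≤ f) :
    loopB f a b 0 (a - b) = solveFuel f a b := by
  rw [loopB_main a.toNat a b 0 (a - b) f hb (by omega) hub le_rfl hf (by omega)]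
  have := solveFuel_le f a b (by omega) (by omega)
  omega

-- ===== VERDICT (by name: the statement is the Claim_ definition above) =====
theorem solve_spec : Claim_equal_solve := by
  intro a b hdom hpre
  have hd : (-2147483648 ≤ a ∧ a ≤ 2147483648) ∧ (-2147483648 ≤ b ∧ b ≤ 2147483648) := by
    simpa [Dom_solve, pvDomInt] using hdom
  show solve a b = solve_alt a b
  unfold solve solve_alt
  by_cases hab : a = b
  · subst hab
    obtain ⟨F, hF⟩ : ∃ F, 2 * a.toNat + 2 * a.toNat + 4 = F + 1 := ⟨_, rfl⟩
    rw [hF, if_neg (lt_irrefl a)]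
    rw [solveFuel_succ, if_neg (lt_irrefl a), if_pos rfl, loopB_succ, if_neg (by simp)]
    omega
  · have hpre' : 1 ≤ a ∧ 1 ≤ b := by
      rcases hpre with h | h
      · exact absurd h hab
      · exact h
    obtain ⟨ha1, hb1⟩ := hpre'
    have hub : a ≤ 2 ^ 31 := by omega
    have hvb : b ≤ 2 ^ 31 := by omega
    by_cases hlt : a < b
    · rw [if_pos hlt]
      obtain ⟨F, hF⟩ : ∃ F, 2 * a.toNat + 2 * b.toNat + 4 = F + 1 := ⟨_, rfl⟩
      rw [hF, solveFuel_succ, if_pos hlt]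
      rw [solve_eq_sorted b a ha1 hlt hvb (F + 1) (by omega)]
      exact solveFuel_stab b.toNat b a F (F + 1) ha1 (by omega) hvb le_rfl (by omega)
        (by omega)
    · rw [if_neg hlt]
      exact (solve_eq_sorted a b hb1 (by omega) hub _ (by omega)).symm
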